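-- pv_equiv track=rewrite | github.com/timostar1/wald_and_dorf_bot | dish_parser.py | dish_parser
-- ===== SOURCE A (Python) =====
-- def dish_parser(message_from_chief):
--     '''
--     :param message_from_chief:
--     :return: to_cook, repeated_dishes
--     '''
--
--     # Cписок еды, отправлен боту завпитами.
--     # Количество блюд указывается через пробел после названия.
--     # Если блюдо одно, то количество не указывается.
--     # Каждое новое блюдо начинается с новой строки.
--     # Например,
--     #       "Борщ 4
--     #       Макароны 3
--     #       Сырный суп 2".
--     # Мы разделим сообщение на список из строк.
--     message_from_chief_divided = message_from_chief.split('\n')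
--
--     # to_cook - словарь из пар "название блюда - количество блюда"
--     to_cook = dict()
--
--     # repeated_dishes - список повторяющихся блюд
--     repeated_dishes = set()
--
--     # Функция добавления блюда в to_cook
--     def add_dish(name, count):
--         if name == '':
--             # Если название блюда оказывается пустым, то ничего не делаем
--             pass
--         elif name in to_cook:
--             # Если такое блюдо уже было,
--             # То мы сообщим об этом завпитам
--             # Добавим его в список repeated_dishes
--             repeated_dishes.add(name)
--
--             # И прибавим новое количество к уже имеющемуся в to_cook
--             to_cook[name] += count
--         else:
--             # Если всё хорошо,
--             # Добавляем то, что получилось в to_cook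
--             to_cook[name] = count
--
--     # Для каждого блюда в списке message_from_chief_divided
--     for dish in message_from_chief_divided:
--
--         # Очищаем строку от пробелов в начале и в конце
--         dish = dish.strip()
--
--         # string_divided - строка, разбитая на слова
--         string_divided = dish.split()
--
--         if string_divided == []:
--             # Если строка была пустой, то он пропускает её
--             pass
--
--         elif string_divided[-1].isdigit():
--             # Если последнее слово в ней является числом
--             # Мы удаляем его и записываем в отдельную переменную
--             dish_count = int(string_divided.pop())
--             # А всё остальное, т. е. название блюда - в другую переменную
--             dish_name = ' '.join(string_divided)
--             add_dish(dish_name, dish_count)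
--
--
--         else:
--             # Если же нет,
--             # то добавляем всю строку, которая является названием блюда, и количество - 1
--             add_dish(dish, 1)
--
--     # Возвращаем to_cook и repeated_dishes
--     return to_cook, repeated_dishes
-- ===== SOURCE B (Python) =====
-- def dish_parser(message_from_chief):
--     # Stage 1: parse every line into a (name, count) pair (blank lines dropped).
--     pairs = []
--     for raw in message_from_chief.split('\n'):
--         line = raw.strip()
--         words = line.split()
--         if words:
--             if words[-1].isdigit():
--                 pairs.append((' '.join(words[:-1]), int(words[-1])))
--             else:
--                 pairs.append((line, 1))
--     # Stage 2: group by name over the whole pair list (no incremental dict):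
--     # totals are per-name sums, repeats are names with an earlier occurrence.
--     names = [n for n, _ in pairs if n != '']
--     to_cook = {n: sum(c for m, c in pairs if m == n) for n in dict.fromkeys(names)}
--     repeated_dishes = {n for i, n in enumerate(names) if n in names[:i]}
--     return to_cook, repeated_dishes
-- ===== Notes on version B (the rewrite author's own statement) =====
-- stated objective: alternative
-- what changed: A's single interleaved loop that mutates a dict and a repeated-set per line is replaced by a stage that collects all (name,count) pairs and then grouping comprehensions: totals computed as a per-distinct-name sum over the whole pair list and the repeated set as the names having an earlier occurrence, with no incremental dict accumulation at all.
import Mathlib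
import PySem

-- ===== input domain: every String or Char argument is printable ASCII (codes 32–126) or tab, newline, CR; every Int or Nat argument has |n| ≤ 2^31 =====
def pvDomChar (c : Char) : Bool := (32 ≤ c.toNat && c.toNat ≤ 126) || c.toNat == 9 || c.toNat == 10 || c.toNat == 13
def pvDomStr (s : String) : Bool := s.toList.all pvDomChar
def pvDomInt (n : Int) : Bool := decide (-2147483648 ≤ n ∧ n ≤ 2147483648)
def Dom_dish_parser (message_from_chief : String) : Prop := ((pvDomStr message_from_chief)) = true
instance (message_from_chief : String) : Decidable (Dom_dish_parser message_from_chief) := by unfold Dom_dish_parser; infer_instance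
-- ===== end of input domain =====

-- B replaces A's single interleaved loop (dict/set mutated per line) by collecting all
-- (name, count) pairs first and then GROUPING: each total is a sum over the whole pair
-- list and the repeated set is the names with an earlier occurrence; same return value,
-- objective: alternative algorithm (no incremental accumulation; no speed claim).

-- ===== PORT A =====
-- A's inner add_dish closure: state is (to_cook, repeated_dishes).
def dishParserAdd (toCook : PySem.Dict String Int) (repeated : PySem.Set String)
    (name : String) (count : Int) : PySem.Dict String Int × PySem.Set String :=
  if name = "" then (toCook, repeated)
  else if toCook.contains name then
    (toCook.insert name (toCook.getD name 0 + count), PySem.Set.add repeated name)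
  else (toCook.insert name count, repeated)

def dish_parser (message_from_chief : String) : (List (String × Int)) × List String :=
  -- message_from_chief.split('\n'); sep ≠ "" so split? is some
  let lines := (PySem.Str.split? message_from_chief "\n").getD []
  let st := lines.foldl (fun st dish =>
      let dish := PySem.Str.strip dish
      let words := PySem.Str.split₀ dish
      if words = [] then st
      else if PySem.Str.strIsdigit ((PySem.List.pyGet? words (-1)).getD "") then
        -- string_divided.pop(); words ≠ [] so pop? is some
        match PySem.List.pop? words with
        | none => st
        | some (last, rest) =>
          -- int(last): last is a nonempty all-digit string here, so ofStr? is some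
          dishParserAdd st.1 st.2 (PySem.Str.join " " rest) ((PySem.Int.ofStr? last).getD 0)
      else dishParserAdd st.1 st.2 dish 1)
    (PySem.Dict.empty, PySem.Set.empty)
  (st.1.items, st.2)

-- ===== PORT B =====
def dish_parser_alt (message_from_chief : String) : (List (String × Int)) × List String :=
  -- Stage 1: every line becomes a (name, count) pair; blank lines are dropped.
  let pairs := ((PySem.Str.split? message_from_chief "\n").getD []).foldl (fun acc raw =>
      let line := PySem.Str.strip raw
      let words := PySem.Str.split₀ line
      if words = [] then acc
      else if PySem.Str.strIsdigit ((PySem.List.pyGet? words (-1)).getD "") then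
        acc ++ [(PySem.Str.join " " (PySem.List.slice words none (some (-1))),
                 (PySem.Int.ofStr? ((PySem.List.pyGet? words (-1)).getD "")).getD 0)]
      else acc ++ [(line, 1)]) []
  -- Stage 2: group by name.  names = [n for n, _ in pairs if n != '']
  let names := pairs.filterMap (fun p => if p.1 ≠ "" then some p.1 else none)
  -- {n: sum(c for m, c in pairs if m == n) for n in dict.fromkeys(names)}
  let to_cook := (PySem.List.dedup names).map (fun n =>
      (n, (pairs.filterMap (fun p => if p.1 = n then some p.2 else none)).sum))
  -- {n for i, n in enumerate(names) if n in names[:i]}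
  let repeated := PySem.Set.ofList ((PySem.List.enumerate names).filterMap
      (fun q => if (PySem.List.slice names none (some q.1)).contains q.2 then some q.2 else none))
  (to_cook, repeated)

-- ===== PRECONDITION & SPEC =====
def Spec_dish_parser (message_from_chief : String) (out : (List (String × Int)) × List String) : Prop := out = dish_parser_alt message_from_chief
instance (message_from_chief : String) (out : (List (String × Int)) × List String) : Decidable (Spec_dish_parser message_from_chief out) := by unfold Spec_dish_parser; infer_instance

-- ===== CLAIM (what is proved, stated in full; the proofs are below) =====
def Claim_equal_dish_parser : Prop := ∀ (message_from_chief : String), Dom_dish_parser message_from_chief → Spec_dish_parser message_from_chief (dish_parser message_from_chief)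

-- ===== LEMMAS AND PROOFS =====

-- the pairs one line contributes ([] for a blank line)
def linePairs (raw : String) : List (String × Int) :=
  let line := PySem.Str.strip raw
  let words := PySem.Str.split₀ line
  if words = [] then []
  else if PySem.Str.strIsdigit ((PySem.List.pyGet? words (-1)).getD "") then
    [(PySem.Str.join " " (PySem.List.slice words none (some (-1))),
      (PySem.Int.ofStr? ((PySem.List.pyGet? words (-1)).getD "")).getD 0)]
  else [(PySem.Str.strip raw, 1)]

-- A's loop step, seen as a function of the parsed pair
def dishStep (st : PySem.Dict String Int × PySem.Set String) (p : String × Int) :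
    PySem.Dict String Int × PySem.Set String :=
  dishParserAdd st.1 st.2 p.1 p.2

def namesOf (ps : List (String × Int)) : List String :=
  ps.filterMap (fun p => if p.1 ≠ "" then some p.1 else none)

def totOf (ps : List (String × Int)) (n : String) : Int :=
  (ps.filterMap (fun p => if p.1 = n then some p.2 else none)).sum

def dupsOf (ns : List String) : List String :=
  (PySem.List.enumerate ns).filterMap
    (fun q => if (PySem.List.slice ns none (some q.1)).contains q.2 then some q.2 else none)

-- words[:-1] of a nonempty list drops its last element.
lemma slice_dropLast {α : Type} (ys : List α) (y : α) :
    PySem.List.slice (ys ++ [y]) none (some (-1)) = ys := by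
  simp [PySem.List.slice]

-- A's loop body on one line is the fold of dishStep over that line's pairs.
lemma abody_eq (st : PySem.Dict String Int × PySem.Set String) (raw : String) :
    (let dish := PySem.Str.strip raw
     let words := PySem.Str.split₀ dish
     if words = [] then st
     else if PySem.Str.strIsdigit ((PySem.List.pyGet? words (-1)).getD "") then
       match PySem.List.pop? words with
       | none => st
       | some (last, rest) =>
         dishParserAdd st.1 st.2 (PySem.Str.join " " rest) ((PySem.Int.ofStr? last).getD 0)
     else dishParserAdd st.1 st.2 dish 1) =
    (linePairs raw).foldl dishStep st := by
  unfold linePairs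
  dsimp only
  by_cases hw : PySem.Str.split₀ (PySem.Str.strip raw) = []
  · simp [hw]
  · obtain ⟨ys, y, hys⟩ := (PySem.Str.split₀ (PySem.Str.strip raw)).eq_nil_or_concat'.resolve_left hw
    have hy : (PySem.List.pyGet? (PySem.Str.split₀ (PySem.Str.strip raw)) (-1)).getD "" = y := by
      rw [hys]; simp
    rw [hy, hys]
    simp only [PySem.List.pop?_last, slice_dropLast]
    by_cases hd : PySem.Chars.strIsdigit y.toList <;> simp [hd, dishStep]

-- A's whole loop = fold of dishStep over the concatenation of the per-line pairs.
lemma afold_eq (lines : List String) (st : PySem.Dict String Int × PySem.Set String) :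
    lines.foldl (fun st dish =>
      let dish := PySem.Str.strip dish
      let words := PySem.Str.split₀ dish
      if words = [] then st
      else if PySem.Str.strIsdigit ((PySem.List.pyGet? words (-1)).getD "") then
        match PySem.List.pop? words with
        | none => st
        | some (last, rest) =>
          dishParserAdd st.1 st.2 (PySem.Str.join " " rest) ((PySem.Int.ofStr? last).getD 0)
      else dishParserAdd st.1 st.2 dish 1) st =
    (lines.flatMap linePairs).foldl dishStep st := by
  induction lines generalizing st with
  | nil => rfl
  | cons l t ih =>
      simp only [List.foldl_cons, List.flatMap_cons, List.foldl_append]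
      rw [abody_eq st l]; exact ih _

-- B's pair-building loop builds exactly that concatenation.
lemma bpairs_eq (lines : List String) :
    lines.foldl (fun acc raw =>
      let line := PySem.Str.strip raw
      let words := PySem.Str.split₀ line
      if words = [] then acc
      else if PySem.Str.strIsdigit ((PySem.List.pyGet? words (-1)).getD "") then
        acc ++ [(PySem.Str.join " " (PySem.List.slice words none (some (-1))),
                 (PySem.Int.ofStr? ((PySem.List.pyGet? words (-1)).getD "")).getD 0)]
      else acc ++ [(line, 1)]) [] = lines.flatMap linePairs := by
  have h : (fun (acc : List (String × Int)) raw =>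
      let line := PySem.Str.strip raw
      let words := PySem.Str.split₀ line
      if words = [] then acc
      else if PySem.Str.strIsdigit ((PySem.List.pyGet? words (-1)).getD "") then
        acc ++ [(PySem.Str.join " " (PySem.List.slice words none (some (-1))),
                 (PySem.Int.ofStr? ((PySem.List.pyGet? words (-1)).getD "")).getD 0)]
      else acc ++ [(line, 1)]) = fun acc raw => acc ++ linePairs raw := by
    funext acc raw
    unfold linePairs
    dsimp only
    split_ifs <;> simp
  rw [h, PySem.List.foldl_append_eq_flatMap]
  simp

lemma namesOf_append (ps : List (String × Int)) (p : String × Int) :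
    namesOf (ps ++ [p]) = namesOf ps ++ (if p.1 ≠ "" then [p.1] else []) := by
  unfold namesOf; rw [List.filterMap_append]; split_ifs with h <;> simp [h]

lemma totOf_append (ps : List (String × Int)) (p : String × Int) (n : String) :
    totOf (ps ++ [p]) n = totOf ps n + (if p.1 = n then p.2 else 0) := by
  unfold totOf; rw [List.filterMap_append, List.sum_append]; split_ifs with h <;> simp [h]

lemma totOf_not_mem (ps : List (String × Int)) (n : String) (hn : n ≠ "")
    (h : n ∉ namesOf ps) : totOf ps n = 0 := by
  unfold totOf
  have hnil : ps.filterMap (fun p => if p.1 = n then some p.2 else none) = [] := by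
    rw [List.filterMap_eq_nil_iff]
    intro p hp
    have he : p.1 ≠ n := by
      intro he
      apply h
      unfold namesOf
      rw [List.mem_filterMap]
      exact ⟨p, hp, by simp [he, hn]⟩
    simp [he]
  rw [hnil]
  rfl

lemma dupsOf_append (ns : List String) (n : String) :
    dupsOf (ns ++ [n]) = dupsOf ns ++ (if n ∈ ns then [n] else []) := by
  unfold dupsOf
  rw [PySem.List.enumerate_append, List.filterMap_append]
  congr 1
  · apply List.filterMap_congr
    intro q hq
    obtain ⟨k, hk, rfl⟩ := (PySem.List.mem_enumerate_iff _ _ _).1 hq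
    simp only [zero_add]
    rw [PySem.List.slice_to_natCast, PySem.List.slice_to_natCast,
        List.take_append_of_le_length (by omega)]
  · simp only [PySem.List.enumerate_cons, PySem.List.enumerate_nil, zero_add,
      List.filterMap_cons, List.filterMap_nil]
    rw [PySem.List.slice_to_natCast, List.take_left]
    by_cases hm : n ∈ ns <;> simp [hm]

-- the fold of dishStep, characterised by B's grouping expressions
lemma fold_inv (ps : List (String × Int)) :
    (ps.foldl dishStep (PySem.Dict.empty, PySem.Set.empty)).1.items =
      (PySem.Set.ofList (namesOf ps)).map (fun n => (n, totOf ps n)) ∧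
    (ps.foldl dishStep (PySem.Dict.empty, PySem.Set.empty)).2 =
      PySem.Set.ofList (dupsOf (namesOf ps)) := by
  induction ps using List.reverseRecOn with
  | nil => constructor <;> rfl
  | append_singleton ps p ih =>
      obtain ⟨ih1, ih2⟩ := ih
      rw [List.foldl_append, List.foldl_cons, List.foldl_nil]
      set st := ps.foldl dishStep (PySem.Dict.empty, PySem.Set.empty) with hst
      have hkeys : st.1.keys = PySem.Set.ofList (namesOf ps) := by
        show st.1.items.map (·.1) = _
        rw [ih1, List.map_map]
        simp [Function.comp_def]
      have hnodup : st.1.keys.Nodup := by rw [hkeys]; exact PySem.Set.nodup_ofList _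
      have hcont : ∀ n, st.1.contains n = true ↔ n ∈ namesOf ps := by
        intro n
        rw [PySem.Dict.contains_iff_mem_keys, hkeys, PySem.Set.mem_ofList]
      by_cases hblank : p.1 = ""
      · have hnm : namesOf (ps ++ [p]) = namesOf ps := by
          rw [namesOf_append]; simp [hblank]
        have htot : ∀ n ∈ namesOf ps, totOf (ps ++ [p]) n = totOf ps n := by
          intro n hn
          have hne : ¬ p.1 = n := by
            intro h
            rw [hblank] at h
            subst h
            unfold namesOf at hn
            rw [List.mem_filterMap] at hn
            obtain ⟨q, _, hq⟩ := hn
            by_cases hq1 : q.1 = "" <;> simp [hq1] at hq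
          rw [totOf_append, if_neg hne, add_zero]
        have hstep : dishStep st p = st := by
          simp [dishStep, dishParserAdd, hblank]
        rw [hstep]
        refine ⟨?_, by rw [hnm]; exact ih2⟩
        rw [hnm, ih1]
        apply List.map_congr_left
        intro n hn
        rw [htot n ((PySem.Set.mem_ofList _ _).1 hn)]
      · have hnm : namesOf (ps ++ [p]) = namesOf ps ++ [p.1] := by
          rw [namesOf_append]; simp [hblank]
        have htot_ne : ∀ n, n ≠ p.1 → totOf (ps ++ [p]) n = totOf ps n := by
          intro n hne
          rw [totOf_append, if_neg (fun h => hne (Eq.symm h)), add_zero]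
        have htot_eq : totOf (ps ++ [p]) p.1 = totOf ps p.1 + p.2 := by
          rw [totOf_append, if_pos rfl]
        by_cases hc : st.1.contains p.1
        · have hmem : p.1 ∈ namesOf ps := (hcont p.1).1 hc
          have hstep : dishStep st p =
              (st.1.insert p.1 (st.1.getD p.1 0 + p.2), PySem.Set.add st.2 p.1) := by
            simp [dishStep, dishParserAdd, hblank, hc]
          rw [hstep]
          constructor
          · show (st.1.insert p.1 (st.1.getD p.1 0 + p.2)).items = _
            rw [PySem.Dict.items_insert_of_contains _ _ hc, ih1, List.map_map]
            rw [hnm, PySem.Set.ofList_append_singleton,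
                PySem.Set.add_of_mem ((PySem.Set.mem_ofList _ _).2 hmem)]
            apply List.map_congr_left
            intro n hn
            by_cases he : n = p.1
            · rw [he] at hn ⊢
              have hget : st.1.getD p.1 0 = totOf ps p.1 := by
                apply PySem.Dict.getD_of_mem_items st.1 (v := totOf ps p.1) ?_ hnodup
                rw [ih1]
                exact List.mem_map_of_mem hn
              simp [htot_eq, hget]
            · simp only [Function.comp_apply]
              rw [if_neg (by simp [he]), htot_ne n he]
          · show PySem.Set.add st.2 p.1 = _
            rw [ih2, hnm, dupsOf_append, if_pos hmem, PySem.Set.ofList_append_singleton]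
        · have hmem : p.1 ∉ namesOf ps := fun h => hc ((hcont p.1).2 h)
          have hstep : dishStep st p = (st.1.insert p.1 p.2, st.2) := by
            simp [dishStep, dishParserAdd, hblank, hc]
          rw [hstep]
          constructor
          · show (st.1.insert p.1 p.2).items = _
            rw [PySem.Dict.items_insert_of_not_contains _ _ (by simpa using hc), ih1]
            rw [hnm, PySem.Set.ofList_append_singleton,
                PySem.Set.add_of_not_mem (by rw [PySem.Set.mem_ofList]; exact hmem),
                List.map_append]
            congr 1
            · apply List.map_congr_left
              intro n hn
              rw [htot_ne n (fun he => hmem (he ▸ (PySem.Set.mem_ofList _ _).1 hn))]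
            · simp [htot_eq, totOf_not_mem ps p.1 hblank hmem]
          · show st.2 = _
            rw [ih2, hnm, dupsOf_append, if_neg hmem, List.append_nil]

-- ===== VERDICT (by name: the statement is the Claim_ definition above) =====
theorem dish_parser_spec : Claim_equal_dish_parser := by
  intro m _
  unfold Spec_dish_parser dish_parser dish_parser_alt
  dsimp only
  rw [afold_eq, bpairs_eq]
  obtain ⟨h1, h2⟩ := fold_inv (((PySem.Str.split? m "\n").getD []).flatMap linePairs)
  rw [h1, h2]
  rfl
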